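-- pv_equiv track=rewrite | github.com/pypi-data/pypi-mirror-403 | packages/nextpy-framework/nextpy_framework-2.4.6-py3-none-any.whl/nextpy/components/feedback.py | Skeleton
-- ===== SOURCE A (Python) =====
-- def Skeleton(
--     width: str = "w-full",
--     height: str = "h-4",
--     count: int = 1,
--     **kwargs
-- ) -> str:
--     """Skeleton loader component"""
--     skeletons = ""
--     for _ in range(count):
--         skeletons += f'<div class="bg-gray-200 rounded animate-pulse {width} {height} mb-2"></div>'
--
--     return skeletons
-- ===== SOURCE B (Python) =====
-- def Skeleton(
--     width: str = "w-full",
--     height: str = "h-4",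
--     count: int = 1,
--     **kwargs
-- ) -> str:
--     """Skeleton loader component"""
--     div = f'<div class="bg-gray-200 rounded animate-pulse {width} {height} mb-2"></div>'
--
--     def rep(n: int) -> str:
--         # repeated doubling: n copies of div in O(log n) concatenations
--         if n <= 0:
--             return ""
--         half = rep(n // 2)
--         s = half + half
--         if n % 2 != 0:
--             s += div
--         return s
--
--     return rep(count)
-- ===== Notes on version B (the rewrite author's own statement) =====
-- stated objective: alternative
-- what changed: Replaces the range(count) accumulation loop with a recursive repeated-doubling (exponentiation-by-squaring on concatenation): rep(n) = rep(n//2)+rep(n//2) plus one div when n is odd, using O(log count) concatenations instead of count appends.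
import Mathlib
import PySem

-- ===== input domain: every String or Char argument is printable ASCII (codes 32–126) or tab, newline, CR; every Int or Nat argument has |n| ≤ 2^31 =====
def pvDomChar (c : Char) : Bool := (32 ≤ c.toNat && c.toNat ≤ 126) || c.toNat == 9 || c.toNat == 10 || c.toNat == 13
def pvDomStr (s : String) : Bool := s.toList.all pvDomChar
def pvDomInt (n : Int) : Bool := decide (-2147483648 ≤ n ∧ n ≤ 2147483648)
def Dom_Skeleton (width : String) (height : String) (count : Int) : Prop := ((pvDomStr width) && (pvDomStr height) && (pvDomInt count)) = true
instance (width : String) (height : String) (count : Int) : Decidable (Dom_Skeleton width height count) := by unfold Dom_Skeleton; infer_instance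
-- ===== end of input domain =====

-- B replaces A's range(count) accumulation loop with recursive repeated doubling
-- (rep(n) = rep(n//2) ++ rep(n//2) [++ div if n odd]); objective: alternative.

-- ===== PORT A =====
-- the f-string body, as A interpolates it each iteration
def skelDiv (width : String) (height : String) : String :=
  "<div class=\"bg-gray-200 rounded animate-pulse " ++ width ++ " " ++ height ++ " mb-2\"></div>"

def Skeleton (width : String) (height : String) (count : Int) : String :=
  (PySem.List.pyRange 0 count 1).foldl
    (fun skeletons _ => skeletons ++ skelDiv width height) ""

-- ===== PORT B =====
-- Source B's inner rep: repeated doubling on n // 2, one extra copy when n is odd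
def skelRep (div : String) (n : Int) : String :=
  if h : n ≤ 0 then ""
  else
    let half := skelRep div (PySem.Int.floordiv n 2)
    let s := half ++ half
    if PySem.Int.mod n 2 ≠ 0 then s ++ div else s
termination_by n.toNat
decreasing_by
  rw [PySem.Int.floordiv_eq_ediv_of_pos (by omega)]
  omega

def Skeleton_alt (width : String) (height : String) (count : Int) : String :=
  skelRep (skelDiv width height) count

-- ===== PRECONDITION & SPEC =====
def Spec_Skeleton (width : String) (height : String) (count : Int) (out : String) : Prop := out = Skeleton_alt width height count
instance (width : String) (height : String) (count : Int) (out : String) : Decidable (Spec_Skeleton width height count out) := by unfold Spec_Skeleton; infer_instance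

-- ===== CLAIM (what is proved, stated in full; the proofs are below) =====
def Claim_equal_Skeleton : Prop := ∀ (width : String) (height : String) (count : Int), Dom_Skeleton width height count → Spec_Skeleton width height count (Skeleton width height count)

-- ===== LEMMAS AND PROOFS =====

theorem foldl_const_append (d : String) (l : List Int) (acc : String) :
    l.foldl (fun a (_ : Int) => a ++ d) acc
      = acc ++ String.ofList (List.replicate l.length d.toList).flatten := by
  induction l generalizing acc with
  | nil => apply String.ext; simp
  | cons x xs ih =>
      simp only [List.foldl_cons, ih, List.length_cons, List.replicate_succ,
        List.flatten_cons]
      apply String.ext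
      simp

theorem skelRep_eq (d : String) (n : Int) :
    skelRep d n = String.ofList (List.replicate n.toNat d.toList).flatten := by
  by_cases h : n ≤ 0
  · rw [skelRep]
    simp only [h, dif_pos, Int.toNat_of_nonpos h]
    apply String.ext
    simp
  · rw [skelRep]
    have h2 : (0:Int) < 2 := by omega
    have ih := skelRep_eq d (PySem.Int.floordiv n 2)
    rw [PySem.Int.floordiv_eq_ediv_of_pos h2] at ih
    rw [PySem.Int.mod_eq_emod_of_pos h2]
    by_cases hodd : n % 2 = 0
    · have hk : n.toNat = (n / 2).toNat + (n / 2).toNat := by omega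
      simp only [h, dif_neg, ih, hodd, ne_eq, not_true_eq_false, if_false,
        PySem.Int.floordiv_eq_ediv_of_pos h2]
      apply String.ext
      rw [hk, List.replicate_add, List.flatten_append]
      simp
    · have hk : n.toNat = (n / 2).toNat + (n / 2).toNat + 1 := by omega
      simp only [h, dif_neg, ih, hodd, ne_eq, not_false_eq_true, if_true,
        PySem.Int.floordiv_eq_ediv_of_pos h2]
      apply String.ext
      rw [hk, List.replicate_add, List.replicate_add, List.flatten_append,
        List.flatten_append]
      simp
termination_by n.toNat
decreasing_by
  rw [PySem.Int.floordiv_eq_ediv_of_pos (by omega)]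
  omega

-- ===== VERDICT (by name: the statement is the Claim_ definition above) =====
theorem Skeleton_spec : Claim_equal_Skeleton := by
  intro width height count _
  unfold Spec_Skeleton Skeleton Skeleton_alt
  rw [foldl_const_append, skelRep_eq, PySem.List.length_pyRange_one]
  apply String.ext
  simp
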